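-- pv_equiv track=rewrite | github.com/LukasTiefenthaler/AOC2022 | Days/Day1.py | part2
-- ===== SOURCE A (Python) =====
-- def part2(_input):
--     most_calories = [0, 0, 0]
--     current_calories = 0
--     for value in _input:
--         if value:
--             current_calories += int(value)
--         else:
--             most_calories.sort()
--             most_calories[0] = max(current_calories, most_calories[0])
--             current_calories = 0
--
--     most_calories.sort()
--     most_calories[0] = max(current_calories, most_calories[0])
--
--     return most_calories[0] + most_calories[1] + most_calories[2]
-- ===== SOURCE B (Python) =====
-- def part2(_input):
--     totals = []
--     current = 0
--     for value in _input:
--         if value: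
--             current += int(value)
--         else:
--             totals.append(current)
--             current = 0
--     totals.append(current)
--     return sum(sorted(totals + [0, 0, 0], reverse=True)[:3])
-- ===== Notes on version B (the rewrite author's own statement) =====
-- stated objective: alternative
-- what changed: A maintains a three-slot list online, re-sorting it and overwriting its minimum at every blank line; B materialises the list of group totals in one pass and returns the sum of the top three of a single final reverse sort seeded with three zeros.
import Mathlib
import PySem

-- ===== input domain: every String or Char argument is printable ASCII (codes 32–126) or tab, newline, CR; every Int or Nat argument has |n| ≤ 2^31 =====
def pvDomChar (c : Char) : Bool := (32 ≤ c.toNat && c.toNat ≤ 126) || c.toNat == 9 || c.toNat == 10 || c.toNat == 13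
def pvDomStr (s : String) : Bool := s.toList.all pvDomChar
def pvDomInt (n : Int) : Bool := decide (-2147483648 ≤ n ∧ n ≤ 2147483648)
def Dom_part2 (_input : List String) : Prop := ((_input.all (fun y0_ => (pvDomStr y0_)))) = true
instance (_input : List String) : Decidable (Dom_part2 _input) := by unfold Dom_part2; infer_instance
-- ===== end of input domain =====

-- B replaces A's online three-slot min-replacement (a sort of the slot list at every blank line)
-- with materialising the list of group totals in one pass and summing the top three of one final sort.

-- ===== PORT A =====
-- most_calories.sort(); most_calories[0] = max(current_calories, most_calories[0])
def pvFlush (mc : List Int) (cur : Int) : List Int :=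
  let s := PySem.List.sorted mc (fun x => x) false
  s.set 0 (max cur (PySem.List.pyGetD s 0 0))

def pvStepA (st : List Int × Int) (v : String) : List Int × Int :=
  if v ≠ "" then (st.1, st.2 + (PySem.Int.ofStr? v).getD 0)
  else (pvFlush st.1 st.2, 0)

def part2 (_input : List String) : Int :=
  let st := _input.foldl pvStepA ([0, 0, 0], 0)
  let mc := pvFlush st.1 st.2
  PySem.List.pyGetD mc 0 0 + PySem.List.pyGetD mc 1 0 + PySem.List.pyGetD mc 2 0

-- ===== PORT B =====
def pvStepB (st : List Int × Int) (v : String) : List Int × Int :=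
  if v ≠ "" then (st.1, st.2 + (PySem.Int.ofStr? v).getD 0)
  else (st.1 ++ [st.2], 0)

def part2_alt (_input : List String) : Int :=
  let st := _input.foldl pvStepB ([], 0)
  let totals := st.1 ++ [st.2]
  ((PySem.List.sorted (totals ++ [0, 0, 0]) (fun x => x) true).take 3).sum

-- ===== PRECONDITION & SPEC =====
-- Pre_ excludes exactly the inputs where Python A raises ValueError: a nonempty line int() cannot parse.
def Pre_part2 (_input : List String) : Prop :=
  ∀ s ∈ _input, s ≠ "" → (PySem.Int.ofStr? s).isSome = true
instance (_input : List String) : Decidable (Pre_part2 _input) := by unfold Pre_part2; infer_instance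
def pvWitness_part2 : List String := ["1000", "2000", "", "3000", "", "4000"]

def Spec_part2 (_input : List String) (out : Int) : Prop := out = part2_alt _input
instance (_input : List String) (out : Int) : Decidable (Spec_part2 _input out) := by unfold Spec_part2; infer_instance

-- ===== CLAIM (what is proved, stated in full; the proofs are below) =====
def Claim_equal_part2 : Prop := ∀ (_input : List String), Dom_part2 _input → Pre_part2 _input → Spec_part2 _input (part2 _input)

-- ===== LEMMAS AND PROOFS =====

-- the ascending list of the three largest of ts ++ [0,0,0]
def pvAsc3 (ts : List Int) : List Int :=
  ((PySem.List.sorted (ts ++ [0, 0, 0]) (fun x => x) true).take 3).reverse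

lemma pvSortedDesc_perm_eq (xs ys : List Int) (h : xs.Perm ys) :
    PySem.List.sorted xs (fun x => x) true = PySem.List.sorted ys (fun x => x) true := by
  exact List.Perm.eq_of_pairwise
    (fun a b _ _ h1 h2 => le_antisymm h2 h1)
    (PySem.List.sorted_pairwise_rev xs (fun x => x))
    (PySem.List.sorted_pairwise_rev ys (fun x => x))
    (((PySem.List.sorted_perm xs _ true).trans h).trans (PySem.List.sorted_perm ys _ true).symm)

lemma pvSortedDesc_append (xs : List Int) (t : Int) :
    PySem.List.sorted (xs ++ [t]) (fun x => x) true =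
      PySem.List.insertBy (fun a b => decide (b < a)) t (PySem.List.sorted xs (fun x => x) true) := by
  rw [PySem.List.sorted_rev_eq_foldl_insertBy, PySem.List.sorted_rev_eq_foldl_insertBy,
    List.foldl_append]
  rfl

lemma pvAsc3_shape (ts : List Int) :
    ∃ d0 d1 d2 r, PySem.List.sorted (ts ++ [0, 0, 0]) (fun x => x) true = d0 :: d1 :: d2 :: r ∧
      d1 ≤ d0 ∧ d2 ≤ d1 := by
  have hlen : (PySem.List.sorted (ts ++ [0, 0, 0]) (fun x => x) true).length = ts.length + 3 := by
    rw [PySem.List.length_sorted]; simp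
  have hpw := PySem.List.sorted_pairwise_rev (ts ++ [0, 0, 0]) (fun x => x)
  match hs : PySem.List.sorted (ts ++ [0, 0, 0]) (fun x => x) true with
  | [] => rw [hs] at hlen; simp at hlen
  | [a] => rw [hs] at hlen; simp at hlen
  | [a, b] => rw [hs] at hlen; simp at hlen
  | d0 :: d1 :: d2 :: r =>
    rw [hs] at hpw
    simp only [List.pairwise_cons] at hpw
    exact ⟨d0, d1, d2, r, rfl, hpw.1 d1 (by simp), hpw.2.1 d2 (by simp)⟩

lemma pvFlush_asc3 (ts : List Int) (t : Int) :
    PySem.List.sorted ((pvAsc3 ts).set 0 (max t (PySem.List.pyGetD (pvAsc3 ts) 0 0)))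
      (fun x => x) false = pvAsc3 (ts ++ [t]) := by
  obtain ⟨d0, d1, d2, r, hD, h10, h21⟩ := pvAsc3_shape ts
  have hasc : pvAsc3 ts = [d2, d1, d0] := by
    unfold pvAsc3; rw [hD]; rfl
  have hRHS : PySem.List.sorted (ts ++ [t] ++ [0, 0, 0]) (fun x => x) true =
      PySem.List.insertBy (fun a b => decide (b < a)) t (d0 :: d1 :: d2 :: r) := by
    rw [pvSortedDesc_perm_eq (ts ++ [t] ++ [0, 0, 0]) ((ts ++ [0, 0, 0]) ++ [t])
      (by
        simpa [List.append_assoc] using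
          (List.Perm.append_left ts
            (List.perm_append_comm (l₁ := [t]) (l₂ := ([0, 0, 0] : List Int)))))]
    rw [pvSortedDesc_append, hD]
  rw [hasc]
  unfold pvAsc3
  rw [List.append_assoc] at hRHS ⊢
  rw [hRHS]
  have hget : PySem.List.pyGetD [d2, d1, d0] 0 0 = d2 := by
    simp [PySem.List.pyGetD, PySem.List.pyGet?, PySem.List.pyIdx?]
  rw [hget]
  by_cases h0 : d0 < t
  · have hmax : max t d2 = t := max_eq_left (le_of_lt (lt_of_le_of_lt (h21.trans h10) h0))
    simp only [PySem.List.insertBy, h0, decide_true, if_true]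
    simp only [List.set, hmax]
    show (PySem.List.sorted [t, d1, d0] fun x => x) = [d1, d0, t]
    refine PySem.List.sorted_id_eq_of_perm_of_pairwise _ [d1, d0, t] ?_ ?_
    · exact List.Perm.trans (List.Perm.cons d1 (List.Perm.swap t d0 []))
        (List.Perm.swap t d1 [d0])
    · simp only [List.pairwise_cons, List.mem_cons]
      constructor
      · rintro y (rfl | rfl | h) <;> first | exact h10 | exact le_of_lt (lt_of_le_of_lt h10 h0) | simp_all
      constructor
      · rintro y (rfl | h) <;> first | exact le_of_lt h0 | simp_all
      · simp
  · by_cases h1 : d1 < t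
    · have hmax : max t d2 = t := max_eq_left (le_of_lt (lt_of_le_of_lt h21 h1))
      simp only [PySem.List.insertBy, h0, h1, decide_true, decide_false, if_true,
        Bool.false_eq_true]
      simp only [List.set, hmax]
      show (PySem.List.sorted [t, d1, d0] fun x => x) = [d1, t, d0]
      refine PySem.List.sorted_id_eq_of_perm_of_pairwise _ [d1, t, d0] ?_ ?_
      · exact List.Perm.swap t d1 [d0]
      · simp only [List.pairwise_cons, List.mem_cons]
        refine ⟨?_, ?_, ?_⟩
        · rintro y (rfl | rfl | h) <;> first | exact le_of_lt h1 | exact h10 | simp_all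
        · rintro y (rfl | h) <;> first | exact le_of_not_gt h0 | simp_all
        · simp
    · by_cases h2 : d2 < t
      · have hmax : max t d2 = t := max_eq_left (le_of_lt h2)
        simp only [PySem.List.insertBy, h0, h1, h2, decide_false, if_false,
          Bool.false_eq_true]
        simp only [List.set, hmax]
        show (PySem.List.sorted [t, d1, d0] fun x => x) = [t, d1, d0]
        refine PySem.List.sorted_eq_self_of_pairwise _ _ ?_
        simp only [List.pairwise_cons, List.mem_cons]
        refine ⟨?_, ?_, ?_⟩
        · rintro y (rfl | rfl | h) <;> first | exact le_of_not_gt h1 | exact le_of_not_gt h0 | simp_all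
        · rintro y (rfl | h) <;> first | exact h10 | simp_all
        · simp
      · have hmax : max t d2 = d2 := max_eq_right (le_of_not_gt h2)
        simp only [PySem.List.insertBy, h0, h1, h2, decide_false, if_false,
          Bool.false_eq_true]
        simp only [List.set, hmax]
        show (PySem.List.sorted [d2, d1, d0] fun x => x) = [d2, d1, d0]
        refine PySem.List.sorted_eq_self_of_pairwise _ _ ?_
        simp only [List.pairwise_cons, List.mem_cons]
        refine ⟨?_, ?_, ?_⟩
        · rintro y (rfl | rfl | h) <;> first | exact h21 | exact h21.trans h10 | simp_all
        · rintro y (rfl | h) <;> first | exact h10 | simp_all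
        · simp

lemma pvInv (input : List String) (mc ts : List Int) (cur : Int)
    (h : PySem.List.sorted mc (fun x => x) false = pvAsc3 ts) :
    (input.foldl pvStepA (mc, cur)).2 = (input.foldl pvStepB (ts, cur)).2 ∧
      PySem.List.sorted (input.foldl pvStepA (mc, cur)).1 (fun x => x) false =
        pvAsc3 (input.foldl pvStepB (ts, cur)).1 := by
  induction input generalizing mc ts cur with
  | nil => exact ⟨rfl, h⟩
  | cons v rest ih =>
    simp only [List.foldl_cons]
    by_cases hv : v = ""
    · simp only [pvStepA, pvStepB]
      rw [if_neg (by simp [hv]), if_neg (by simp [hv])]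
      refine ih _ _ 0 ?_
      unfold pvFlush
      rw [h]
      exact pvFlush_asc3 ts cur
    · simp only [pvStepA, pvStepB]
      rw [if_pos hv, if_pos hv]
      exact ih mc ts _ h

-- ===== VERDICT (by name: the statement is the Claim_ definition above) =====
theorem part2_spec : Claim_equal_part2 := by
  intro _input _hdom _hpre
  obtain ⟨hcur, hmc⟩ := pvInv _input [0, 0, 0] [] 0 (by decide)
  set stA := _input.foldl pvStepA ([0, 0, 0], 0) with hstA
  set stB := _input.foldl pvStepB ([], 0) with hstB
  show part2 _input = part2_alt _input
  have hgoal : part2 _input =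
      PySem.List.pyGetD (pvFlush stA.1 stA.2) 0 0 + PySem.List.pyGetD (pvFlush stA.1 stA.2) 1 0 +
        PySem.List.pyGetD (pvFlush stA.1 stA.2) 2 0 := rfl
  have hgoal' : part2_alt _input =
      ((PySem.List.sorted (stB.1 ++ [stB.2] ++ [0, 0, 0]) (fun x => x) true).take 3).sum := rfl
  rw [hgoal, hgoal']
  have hflush : PySem.List.sorted (pvFlush stA.1 stA.2) (fun x => x) false =
      pvAsc3 (stB.1 ++ [stB.2]) := by
    unfold pvFlush
    rw [hmc, hcur]
    exact pvFlush_asc3 stB.1 stB.2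
  obtain ⟨d0, d1, d2, r, hD, h10, h21⟩ := pvAsc3_shape (stB.1 ++ [stB.2])
  have hasc : pvAsc3 (stB.1 ++ [stB.2]) = [d2, d1, d0] := by
    unfold pvAsc3; rw [hD]; rfl
  -- B's result
  have hB : ((PySem.List.sorted (stB.1 ++ [stB.2] ++ [0, 0, 0]) (fun x => x) true).take 3).sum
      = d2 + d1 + d0 := by
    rw [hD]; simp; ring
  -- A's result: sum of the flushed triple, via the permutation with its sorted form
  have hsum : (pvFlush stA.1 stA.2).sum = d2 + d1 + d0 := by
    have hperm := PySem.List.sorted_perm (pvFlush stA.1 stA.2) (fun x => x) false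
    have := hperm.sum_eq
    rw [hflush, hasc] at this
    simp at this
    omega
  have hlen : (pvFlush stA.1 stA.2).length = 3 := by
    have := PySem.List.length_sorted (pvFlush stA.1 stA.2) (fun x => x) false
    rw [hflush, hasc] at this
    simpa using this.symm
  match hm : pvFlush stA.1 stA.2 with
  | [x, y, z] =>
    rw [hm] at hsum
    simp only [List.sum_cons, List.sum_nil, add_zero] at hsum
    rw [hB]
    simp [PySem.List.pyGetD, PySem.List.pyGet?, PySem.List.pyIdx?]
    omega
  | [] => rw [hm] at hlen; simp at hlen
  | [x] => rw [hm] at hlen; simp at hlen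
  | [x, y] => rw [hm] at hlen; simp at hlen
  | x :: y :: z :: w :: rest => rw [hm] at hlen; simp at hlen
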